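-- pv_equiv track=rewrite | github.com/jh000107/CS111 | CS PS 족보/problemset7(Chan Sol Park)/ps7pr4.py | min_day
-- ===== SOURCE A (Python) =====
-- def min_day(prices):
--     """gets the minimum value in the list and the day in which
--        the value is in"""
--     m = prices[0]
--     count = 0
--     for x in prices:
--         if x < m:
--             count = count + 1
--             m = x
--     return (m, count)
-- ===== SOURCE B (Python) =====
-- def min_day(prices):
--     # build the running-minimum sequence, then read the answer off it
--     runmin = prices[:1]
--     for x in prices[1:]:
--         runmin.append(min(runmin[-1], x))
--     m = runmin[-1]
--     count = sum(1 for a, b in zip(runmin, runmin[1:]) if b < a)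
--     return (m, count)
-- ===== Notes on version B (the rewrite author's own statement) =====
-- stated objective: alternative
-- what changed: Replaces A's single stateful min-and-counter scan by building the explicit running-minimum sequence, taking its last element as the minimum and counting strict decreases between adjacent running minima in a second zip pass.
import Mathlib
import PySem

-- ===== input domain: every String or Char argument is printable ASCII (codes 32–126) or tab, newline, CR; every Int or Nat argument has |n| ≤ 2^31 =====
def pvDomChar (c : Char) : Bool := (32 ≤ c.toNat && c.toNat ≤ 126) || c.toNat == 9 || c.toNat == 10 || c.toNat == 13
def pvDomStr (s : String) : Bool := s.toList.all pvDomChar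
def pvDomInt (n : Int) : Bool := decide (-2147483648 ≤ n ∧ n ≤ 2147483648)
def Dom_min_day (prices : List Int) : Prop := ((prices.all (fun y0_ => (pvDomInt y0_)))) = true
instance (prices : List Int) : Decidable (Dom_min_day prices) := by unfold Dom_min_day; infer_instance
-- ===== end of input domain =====

-- B replaces A's single stateful min-and-counter scan by building the explicit running-minimum
-- sequence, reading the minimum off its last element and counting strict decreases between
-- adjacent running minima in a second zip pass (alternative decomposition, same O(n) cost).
-- Pre_ excludes the empty list, on which both Pythons raise IndexError.


-- ===== PORT A =====
def pvStepA (s : Int × Int) (x : Int) : Int × Int :=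
  if x < s.1 then (x, s.2 + 1) else s

def min_day (prices : List Int) : Int × Int :=
  match PySem.List.pyGet? prices 0 with
  | none => (0, 0)   -- Python raises IndexError here; excluded by Pre_min_day
  | some m => prices.foldl pvStepA (m, 0)

-- ===== PORT B =====
-- one body of Source B's for-loop: runmin.append(min(runmin[-1], x))
def pvAppendMin (acc : List Int) (x : Int) : List Int :=
  acc ++ [min ((PySem.List.pyGet? acc (-1)).getD 0) x]

def min_day_alt (prices : List Int) : Int × Int :=
  let runmin := (PySem.List.slice prices (some 1) none).foldl pvAppendMin
                  (PySem.List.slice prices none (some 1))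
  let m := (PySem.List.pyGet? runmin (-1)).getD 0   -- runmin[-1]; IndexError on [] excluded by Pre_
  let count : Int :=
    ((runmin.zip (PySem.List.slice runmin (some 1) none)).filter (fun q => decide (q.2 < q.1))).length
  (m, count)

-- ===== PRECONDITION & SPEC =====
-- A raises IndexError on the empty list (prices[0]); B raises there too (runmin[-1]).
def Pre_min_day (prices : List Int) : Prop := prices ≠ []
instance (prices : List Int) : Decidable (Pre_min_day prices) := by unfold Pre_min_day; infer_instance
def pvWitness_min_day : List Int := [3, 1, 2, 0]

def Spec_min_day (prices : List Int) (out : Int × Int) : Prop := out = min_day_alt prices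
instance (prices : List Int) (out : Int × Int) : Decidable (Spec_min_day prices out) := by unfold Spec_min_day; infer_instance

-- ===== CLAIM (what is proved, stated in full; the proofs are below) =====
def Claim_equal_min_day : Prop := ∀ (prices : List Int), Dom_min_day prices → Pre_min_day prices → Spec_min_day prices (min_day prices)

-- ===== LEMMAS AND PROOFS =====

/-- Count of strict decreases of the running minimum, as A's loop produces it. -/
def recCount : Int → List Int → Nat
  | _, [] => 0
  | m, x :: xs => (if x < m then 1 else 0) + recCount (min m x) xs

lemma foldA (ys : List Int) : ∀ (m : Int) (c : Int),
    ys.foldl pvStepA (m, c) = (ys.foldl min m, c + (recCount m ys : Int)) := by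
  induction ys with
  | nil => intro m c; simp [recCount]
  | cons x ys ih =>
    intro m c
    by_cases h : x < m
    · have hmin : min m x = x := min_eq_right (le_of_lt h)
      simp [pvStepA, h, recCount, ih, hmin]
      ring
    · have hmin : min m x = m := min_eq_left (by omega)
      simp [pvStepA, h, recCount, ih, hmin]

/-- The running minima of `xs` continued from a current minimum `m`. -/
def tailMins : Int → List Int → List Int
  | _, [] => []
  | m, x :: xs => min m x :: tailMins (min m x) xs

lemma loopB (xs : List Int) : ∀ (pre : List Int) (m : Int), pre.getLast? = some m →
    xs.foldl pvAppendMin pre = pre ++ tailMins m xs := by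
  induction xs with
  | nil => intro pre m _; simp [tailMins]
  | cons x ys ih =>
    intro pre m hlast
    have hstep : pvAppendMin pre x = pre ++ [min m x] := by
      simp [pvAppendMin, PySem.List.pyGet?_neg_one, hlast]
    have hlast' : (pre ++ [min m x]).getLast? = some (min m x) := by
      simp
    simp only [List.foldl_cons, hstep, ih (pre ++ [min m x]) (min m x) hlast', tailMins,
      List.append_assoc, List.singleton_append]

lemma tm_last (xs : List Int) : ∀ (p : Int),
    (p :: tailMins p xs).getLast? = some (xs.foldl min p) := by
  induction xs with
  | nil => intro p; simp [tailMins]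
  | cons x ys ih =>
    intro p
    rw [tailMins, List.getLast?_cons_cons, ih (min p x)]
    simp

/-- Adjacent strict decreases in a list, as B counts them. -/
def dc (l : List Int) : Nat :=
  ((l.zip (l.drop 1)).filter (fun q => decide (q.2 < q.1))).length

lemma dc_cons_cons (a b : Int) (t : List Int) :
    dc (a :: b :: t) = (if b < a then 1 else 0) + dc (b :: t) := by
  simp only [dc, List.drop_succ_cons, List.drop_zero, List.zip_cons_cons, List.filter_cons]
  split_ifs with h <;> simp_all
  omega

lemma tm_dc (xs : List Int) : ∀ (p : Int), dc (p :: tailMins p xs) = recCount p xs := by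
  induction xs with
  | nil => intro p; simp [tailMins, dc, recCount]
  | cons x ys ih =>
    intro p
    rw [tailMins, dc_cons_cons, ih (min p x), recCount]
    by_cases h : x < p
    · have h2 : min p x < p := by omega
      simp [h, h2]
    · have h2 : ¬ min p x < p := by omega
      simp [h, h2]

-- ===== VERDICT (by name: the statement is the Claim_ definition above) =====
theorem min_day_spec : Claim_equal_min_day := by
  intro prices _ hpre
  unfold Spec_min_day
  cases prices with
  | nil => exact absurd rfl hpre
  | cons p rest =>
    have hA : min_day (p :: rest) = (rest.foldl min p, (recCount p rest : Int)) := by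
      unfold min_day
      rw [PySem.List.pyGet?_zero_cons]
      simp only [List.foldl_cons]
      have : pvStepA (p, 0) p = (p, 0) := by simp [pvStepA]
      rw [this, foldA]
      simp
    have h1 : (1 : Int) = ((1 : Nat) : Int) := rfl
    have hinit : PySem.List.slice (p :: rest) none (some 1) = [p] := by
      rw [h1, PySem.List.slice_to_natCast]; simp
    have htail : PySem.List.slice (p :: rest) (some 1) none = rest := by
      rw [h1, PySem.List.slice_from_natCast]; simp
    have hrun : (PySem.List.slice (p :: rest) (some 1) none).foldl pvAppendMin
        (PySem.List.slice (p :: rest) none (some 1)) = p :: tailMins p rest := by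
      rw [hinit, htail, loopB rest [p] p (by simp)]
      simp
    unfold min_day_alt
    rw [hrun, hA]
    have hdc := tm_dc rest p
    unfold dc at hdc
    simp only [List.drop_succ_cons, List.drop_zero] at hdc
    simp only [PySem.List.pyGet?_neg_one, tm_last rest p, Option.getD_some,
      PySem.List.slice_from_one, List.tail_cons, hdc]
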